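-- pv_equiv track=rewrite | github.com/AbishekSh/NASE-a-Windows-Steam-Wrapper-for-MacOS | mysteamwine/steam.py | _tokenize_vdf
-- ===== SOURCE A (Python) =====
-- from typing import Any, Iterator
--
-- def _tokenize_vdf(text: str) -> Iterator[str]:
--     i = 0
--     length = len(text)
--     while i < length:
--         char = text[i]
--         if char.isspace():
--             i += 1
--             continue
--         if char == "/" and i + 1 < length and text[i + 1] == "/":
--             newline = text.find("\n", i)
--             if newline == -1:
--                 break
--             i = newline + 1
--             continue
--         if char in "{}":
--             yield char
--             i += 1
--             continue
--         if char == '"':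
--             i += 1
--             value_chars: list[str] = []
--             while i < length:
--                 current = text[i]
--                 if current == "\\" and i + 1 < length:
--                     value_chars.append(text[i + 1])
--                     i += 2
--                     continue
--                 if current == '"':
--                     i += 1
--                     break
--                 value_chars.append(current)
--                 i += 1
--             yield "".join(value_chars)
--             continue
--         start = i
--         while i < length and not text[i].isspace() and text[i] not in "{}":
--             i += 1
--         yield text[start:i]
-- ===== SOURCE B (Python) =====
-- def _tokenize_vdf(text):
--     # One-pass character state machine (no index arithmetic, no inner loops).
--     DEFAULT, SLASH, COMMENT, STRING, ESCAPE, BARE = range(6)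
--     state = DEFAULT
--     buf = []
--     for c in text:
--         if state == DEFAULT:
--             if c.isspace():
--                 pass
--             elif c == "/":
--                 state = SLASH
--             elif c in "{}":
--                 yield c
--             elif c == '"':
--                 buf = []
--                 state = STRING
--             else:
--                 buf = [c]
--                 state = BARE
--         elif state == SLASH:
--             if c == "/":
--                 state = COMMENT
--             elif c.isspace():
--                 yield "/"
--                 state = DEFAULT
--             elif c in "{}":
--                 yield "/"
--                 yield c
--                 state = DEFAULT
--             else:
--                 buf = ["/", c]
--                 state = BARE
--         elif state == COMMENT:
--             if c == "\n":
--                 state = DEFAULT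
--         elif state == STRING:
--             if c == "\\":
--                 state = ESCAPE
--             elif c == '"':
--                 yield "".join(buf)
--                 state = DEFAULT
--             else:
--                 buf.append(c)
--         elif state == ESCAPE:
--             buf.append(c)
--             state = STRING
--         else:  # BARE
--             if c.isspace():
--                 yield "".join(buf)
--                 state = DEFAULT
--             elif c in "{}":
--                 yield "".join(buf)
--                 yield c
--                 state = DEFAULT
--             else:
--                 buf.append(c)
--     if state == SLASH:
--         yield "/"
--     elif state == STRING or state == BARE:
--         yield "".join(buf)
--     elif state == ESCAPE:
--         yield "".join(buf) + "\\"
-- ===== Notes on version B (the rewrite author's own statement) =====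
-- stated objective: alternative
-- what changed: Replaced A's index-jumping while loop with nested sub-loops (string scan, bare-token scan, newline search, slicing) by a single pass over the characters with an explicit six-state machine (default/slash/comment/string/escape/bare) that yields tokens as state transitions fire.
import Mathlib
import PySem

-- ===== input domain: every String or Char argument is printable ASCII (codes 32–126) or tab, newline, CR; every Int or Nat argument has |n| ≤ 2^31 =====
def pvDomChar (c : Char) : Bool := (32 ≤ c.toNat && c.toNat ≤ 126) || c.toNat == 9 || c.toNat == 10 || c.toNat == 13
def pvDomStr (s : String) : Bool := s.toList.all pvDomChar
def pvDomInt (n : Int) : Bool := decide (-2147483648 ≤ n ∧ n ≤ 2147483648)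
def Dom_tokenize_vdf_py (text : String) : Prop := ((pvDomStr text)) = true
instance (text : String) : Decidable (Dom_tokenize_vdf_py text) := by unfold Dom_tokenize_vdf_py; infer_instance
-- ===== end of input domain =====

-- B replaces A's index-jumping loop with nested sub-loops by a one-pass six-state machine (objective: alternative, same cost).

-- ===== PORT A =====
-- text.find("\n", i): the suffix after the first '\n', or none (A then `break`s)
def findNlA : List Char → Option (List Char)
  | [] => none
  | c :: cs => if c = '\n' then some cs else findNlA cs

-- A's inner quoted-string loop, branch for branch (backslash-with-next / lone
-- trailing backslash / closing quote / ordinary char): (value chars, rest of input)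
def strScanA : List Char → List Char × List Char
  | [] => ([], [])
  | '\\' :: d :: cs' => let r := strScanA cs'; (d :: r.1, r.2)
  | ['\\'] => (['\\'], [])
  | '"' :: cs => ([], cs)
  | c :: cs => let r := strScanA cs; (c :: r.1, r.2)

-- A's inner bare-token loop: by how much i advances
def bareLenA : List Char → Nat
  | [] => 0
  | c :: cs => if PySem.Chars.isspace c || c = '{' || c = '}' then 0 else bareLenA cs + 1

theorem findNlA_lt : ∀ (cs rest : List Char), findNlA cs = some rest → rest.length < cs.length := by
  intro cs
  induction cs with
  | nil => intro rest h; simp [findNlA] at h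
  | cons c cs ih =>
    intro rest h
    by_cases hc : c = '\n'
    · simp [findNlA, hc] at h; simp [← h]
    · simp [findNlA, hc] at h
      exact Nat.lt_succ_of_lt (ih rest h)

theorem strScanA_le : ∀ (cs : List Char), (strScanA cs).2.length ≤ cs.length := by
  intro cs
  induction cs using strScanA.induct with
  | case1 => simp [strScanA]
  | case2 d cs' ih => simp [strScanA]; omega
  | case3 => simp [strScanA]
  | case4 cs => simp [strScanA]
  | case5 c cs h1 h2 ih => simp [strScanA, h1]; omega

-- A's main while loop, consuming the suffix of the text from position i
def loopA : List Char → List String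
  | [] => []
  | c :: cs =>
    if PySem.Chars.isspace c then loopA cs
    else if c = '/' ∧ cs.head? = some '/' then
      match h : findNlA (c :: cs) with
      | none => []
      | some rest => loopA rest
    else if c = '{' ∨ c = '}' then
      String.mk [c] :: loopA cs
    else if c = '"' then
      String.mk (strScanA cs).1 :: loopA (strScanA cs).2
    else if h4 : PySem.Chars.isspace c ∨ c = '{' ∨ c = '}' then
      []  -- unreachable (the first and third branches already caught these chars)
    else
      String.mk ((c :: cs).take (bareLenA (c :: cs))) :: loopA ((c :: cs).drop (bareLenA (c :: cs)))
termination_by cs => cs.length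
decreasing_by
  · simp
  · exact findNlA_lt _ _ h
  · simp
  · have := strScanA_le cs; simp; omega
  · push_neg at h4
    have hb : bareLenA (c :: cs) = bareLenA cs + 1 := by
      simp [bareLenA, h4.1, h4.2.1, h4.2.2]
    simp only [List.length_drop, List.length_cons, hb]
    omega

def tokenize_vdf_py (text : String) : List String := loopA text.toList

-- ===== PORT B =====
inductive VSt
  | dflt | slash | comment
  | instr : List Char → VSt
  | esc : List Char → VSt
  | bare : List Char → VSt
deriving DecidableEq, Repr

-- one transition of B's state machine: (tokens yielded on this character, next state)
def stepB : VSt → Char → List String × VSt := fun s c =>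
  match s with
  | .dflt =>
    if PySem.Chars.isspace c then ([], .dflt)
    else if c = '/' then ([], .slash)
    else if c = '{' ∨ c = '}' then ([String.mk [c]], .dflt)
    else if c = '"' then ([], .instr [])
    else ([], .bare [c])
  | .slash =>
    if c = '/' then ([], .comment)
    else if PySem.Chars.isspace c then (["/"], .dflt)
    else if c = '{' ∨ c = '}' then (["/", String.mk [c]], .dflt)
    else ([], .bare ['/', c])
  | .comment => if c = '\n' then ([], .dflt) else ([], .comment)
  | .instr buf =>
    if c = '\\' then ([], .esc buf)
    else if c = '"' then ([String.mk buf], .dflt)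
    else ([], .instr (buf ++ [c]))
  | .esc buf => ([], .instr (buf ++ [c]))
  | .bare buf =>
    if PySem.Chars.isspace c then ([String.mk buf], .dflt)
    else if c = '{' ∨ c = '}' then ([String.mk buf, String.mk [c]], .dflt)
    else ([], .bare (buf ++ [c]))

-- B's after-the-loop flush
def flushB : VSt → List String
  | .dflt => [] | .comment => []
  | .slash => ["/"]
  | .instr buf => [String.mk buf]
  | .esc buf => [String.mk (buf ++ ['\\'])]
  | .bare buf => [String.mk buf]

def tokenize_vdf_py_alt (text : String) : List String :=
  let r := text.toList.foldl
    (fun acc c => let t := stepB acc.2 c; (acc.1 ++ t.1, t.2))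
    (([] : List String), VSt.dflt)
  r.1 ++ flushB r.2

-- ===== PRECONDITION & SPEC =====
def Spec_tokenize_vdf_py (text : String) (out : List String) : Prop := out = tokenize_vdf_py_alt text
instance (text : String) (out : List String) : Decidable (Spec_tokenize_vdf_py text out) := by unfold Spec_tokenize_vdf_py; infer_instance

-- ===== CLAIM (what is proved, stated in full; the proofs are below) =====
def Claim_equal_tokenize_vdf_py : Prop := ∀ (text : String), Dom_tokenize_vdf_py text → Spec_tokenize_vdf_py text (tokenize_vdf_py text)

-- ===== LEMMAS AND PROOFS =====

-- recursive reading of B's fold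
def runB (s : VSt) : List Char → List String
  | [] => flushB s
  | c :: cs => (stepB s c).1 ++ runB (stepB s c).2 cs

theorem foldl_runB (cs : List Char) : ∀ (acc : List String) (s : VSt),
    (let r := cs.foldl (fun acc c => let t := stepB acc.2 c; (acc.1 ++ t.1, t.2)) (acc, s)
     r.1 ++ flushB r.2) = acc ++ runB s cs := by
  induction cs with
  | nil => intro acc s; simp [runB]
  | cons c cs ih =>
    intro acc s
    simp only [List.foldl_cons, runB]
    rw [ih]
    simp

theorem alt_eq_runB (text : String) : tokenize_vdf_py_alt text = runB .dflt text.toList := by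
  have := foldl_runB text.toList [] .dflt
  simpa [tokenize_vdf_py_alt] using this

theorem runB_comment (cs : List Char) :
    runB .comment cs = (match findNlA cs with
      | none => []
      | some rest => runB .dflt rest) := by
  induction cs with
  | nil => simp [runB, flushB, findNlA]
  | cons c cs ih =>
    by_cases hc : c = '\n'
    · simp [runB, stepB, hc, findNlA]
    · simp [runB, stepB, hc, findNlA, ih]

theorem runB_instr (cs : List Char) : ∀ (buf : List Char),
    runB (.instr buf) cs
      = String.mk (buf ++ (strScanA cs).1) :: runB .dflt (strScanA cs).2 := by
  induction cs using strScanA.induct with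
  | case1 => intro buf; simp [runB, flushB, strScanA]
  | case2 d cs' ih =>
    intro buf
    simp [runB, stepB, strScanA, ih]
  | case3 =>
    intro buf
    simp [runB, stepB, strScanA, flushB]
  | case4 cs =>
    intro buf
    simp [runB, stepB, strScanA, flushB]
  | case5 c cs hne1 hne2 hne3 ih =>
    intro buf
    have h1 : ¬ c = '\\' := by
      intro hh
      cases cs with
      | nil => exact hne2 hh rfl
      | cons d cs' => exact hne1 d cs' hh rfl
    have h2 : ¬ c = '"' := fun hh => hne3 hh
    simp [runB, stepB, strScanA, h1, h2, ih]

theorem runB_bare (cs : List Char) : ∀ (buf : List Char),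
    runB (.bare buf) cs
      = String.mk (buf ++ cs.take (bareLenA cs)) :: runB .dflt (cs.drop (bareLenA cs)) := by
  induction cs with
  | nil => intro buf; simp [runB, flushB, bareLenA]
  | cons c cs ih =>
    intro buf
    by_cases hsp : PySem.Chars.isspace c = true
    · simp [runB, stepB, hsp, bareLenA, flushB]
    · by_cases hbr : c = '{' ∨ c = '}'
      · have hc : ¬ (c = '/') := by rintro rfl; rcases hbr with h | h <;> simp at h
        have h0 : bareLenA (c :: cs) = 0 := by
          rcases hbr with h | h <;> simp [bareLenA, h]
        simp [runB, stepB, hsp, hbr, hc, h0]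
      · have hn : bareLenA (c :: cs) = bareLenA cs + 1 := by
          push_neg at hbr
          simp [bareLenA, hsp, hbr.1, hbr.2]
        simp [runB, stepB, hsp, hbr, hn, ih]

theorem mkSlash : String.mk ['/'] = "/" := by decide

theorem runB_slash (cs : List Char) (h : cs.head? ≠ some '/') :
    runB .slash cs = runB (.bare ['/']) cs := by
  cases cs with
  | nil => simp [runB, flushB, mkSlash]
  | cons c cs =>
    have hc : ¬ (c = '/') := by simpa using h
    by_cases hsp : PySem.Chars.isspace c = true
    · simp [runB, stepB, hc, hsp, mkSlash]
    · by_cases hbr : c = '{' ∨ c = '}'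
      · simp [runB, stepB, hc, hsp, hbr, mkSlash]
      · simp [runB, stepB, hc, hsp, hbr]

theorem runB_dflt_eq_loopA : ∀ (cs : List Char), runB .dflt cs = loopA cs := by
  intro cs
  induction cs using loopA.induct with
  | case1 => simp [runB, loopA, flushB]
  | case2 c cs hsp ih =>
    rw [loopA]
    simp [runB, stepB, hsp, ih]
  | case3 c cs hsp hcm hfind =>
    obtain ⟨hc, hhd⟩ := hcm
    subst hc
    cases cs with
    | nil => simp at hhd
    | cons d cs' =>
      have hd : d = '/' := by simpa using hhd
      subst hd
      rw [loopA]
      rw [if_neg hsp, if_pos ⟨rfl, by simp⟩]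
      have hfind' : findNlA ('/' :: '/' :: cs') = findNlA cs' := by
        simp [findNlA]
      simp only [runB, stepB]
      simp only [if_neg hsp]
      norm_num
      rw [runB_comment]
      rw [hfind'] at hfind ⊢
      rw [hfind]
  | case4 c cs hsp hcm rest hfind ih =>
    obtain ⟨hc, hhd⟩ := hcm
    subst hc
    cases cs with
    | nil => simp at hhd
    | cons d cs' =>
      have hd : d = '/' := by simpa using hhd
      subst hd
      rw [loopA]
      rw [if_neg hsp, if_pos ⟨rfl, by simp⟩]
      have hfind' : findNlA ('/' :: '/' :: cs') = findNlA cs' := by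
        simp [findNlA]
      simp only [runB, stepB]
      simp only [if_neg hsp]
      norm_num
      rw [runB_comment]
      rw [hfind'] at hfind ⊢
      rw [hfind]
      simp [ih]
  | case5 c cs hsp hcm hbr ih =>
    rw [loopA]
    rw [if_neg hsp, if_neg hcm, if_pos hbr]
    have hc : ¬ (c = '/') := by rintro rfl; rcases hbr with h | h <;> simp at h
    simp [runB, stepB, hsp, hc, hbr, ih]
  | case6 cs hsp hcm hbr ih =>
    rw [loopA]
    rw [if_neg hsp, if_neg hcm, if_neg hbr, if_pos rfl]
    have hc : ¬ ('"' = '/') := by decide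
    simp only [runB, stepB]
    simp only [if_neg hsp, if_neg hc, if_neg hbr]
    norm_num
    rw [runB_instr]
    simp [ih]
  | case7 c cs hsp hcm hbr hq h4 =>
    rcases h4 with h | h | h
    · exact absurd h hsp
    · exact absurd (Or.inl h) hbr
    · exact absurd (Or.inr h) hbr
  | case8 c cs hsp hcm hbr hq h4 ih =>
    push_neg at h4
    rw [loopA]
    rw [if_neg hsp, if_neg hcm, if_neg hbr, if_neg hq, dif_neg (by tauto)]
    have hn : bareLenA (c :: cs) = bareLenA cs + 1 := by
      simp [bareLenA, h4.1, h4.2.1, h4.2.2]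
    rw [hn] at ih ⊢
    by_cases hc : c = '/'
    · subst hc
      have hhd : cs.head? ≠ some '/' := by
        intro h; exact hcm ⟨rfl, h⟩
      simp only [runB, stepB]
      simp only [if_neg hsp]
      norm_num
      rw [runB_slash cs hhd, runB_bare]
      simpa using ih
    · simp only [runB, stepB]
      simp only [if_neg hsp, if_neg hc, if_neg hbr, if_neg hq]
      norm_num
      rw [runB_bare]
      simpa using ih

-- ===== VERDICT (by name: the statement is the Claim_ definition above) =====
theorem tokenize_vdf_py_spec : Claim_equal_tokenize_vdf_py := by
  intro text _
  unfold Spec_tokenize_vdf_py tokenize_vdf_py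
  rw [alt_eq_runB, runB_dflt_eq_loopA]
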